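-- pv_equiv track=rewrite | github.com/kyc3492/CodingPractices | Programmers/Lv0/120956.py | solution
-- ===== SOURCE A (Python) =====
-- from itertools import permutations
--
-- def solution(babbling):
--     answer = 0
--     available = ["aya", "ye", "woo", "ma"]
--     words = []
--     for i in range(1, 5):
--         for j in permutations(available, i):
--             words.append(''.join(j))
--
--     for b in babbling:
--         if b in words:
--             answer += 1
--
--     return answer
-- ===== SOURCE B (Python) =====
-- # B: greedy single-pass parser per babbling (tokens have distinct first letters,
-- # so at most one token can match at any position) instead of A's precomputed
-- # list of all 64 token permutations.
--
-- def _valid(s, a_used, y_used, w_used, m_used):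
--     if not s:
--         return a_used or y_used or w_used or m_used
--     if not a_used and s.startswith("aya"):
--         return _valid(s[3:], True, y_used, w_used, m_used)
--     if not y_used and s.startswith("ye"):
--         return _valid(s[2:], a_used, True, w_used, m_used)
--     if not w_used and s.startswith("woo"):
--         return _valid(s[3:], a_used, y_used, True, m_used)
--     if not m_used and s.startswith("ma"):
--         return _valid(s[2:], a_used, y_used, w_used, True)
--     return False
--
-- def solution(babbling):
--     return sum(1 for b in babbling if _valid(b, False, False, False, False))
-- ===== Notes on version B (the rewrite author's own statement) =====
-- stated objective: simpler
-- what changed: B drops A's precomputed list of all 64 permutation-joins and instead greedily parses each babbling in one pass (the four tokens have distinct first letters, so at most one token can match at any position), tracking which tokens were already used.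
import Mathlib
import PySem

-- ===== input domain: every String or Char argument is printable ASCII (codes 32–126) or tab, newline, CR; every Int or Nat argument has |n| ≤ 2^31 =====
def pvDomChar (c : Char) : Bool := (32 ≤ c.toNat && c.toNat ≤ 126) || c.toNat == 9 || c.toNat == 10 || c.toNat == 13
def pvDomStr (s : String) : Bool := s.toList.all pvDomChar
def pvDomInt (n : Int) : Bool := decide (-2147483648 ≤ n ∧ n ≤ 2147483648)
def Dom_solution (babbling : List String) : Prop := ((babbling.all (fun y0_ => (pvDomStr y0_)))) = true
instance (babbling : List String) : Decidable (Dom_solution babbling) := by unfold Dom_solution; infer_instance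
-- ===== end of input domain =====

-- B replaces A's precomputed list of all 64 token permutations by a greedy
-- single-pass parser per babbling string (simpler; equivalence proved below).


-- ===== PORT A =====
-- A's word list: for i in range(1,5): for j in permutations(available, i): words.append(''.join(j))
-- (itertools.permutations is PySem.List.permutations; range(1,5) is pyRange 1 5 1, each i is 1..4 so i.toNat is exact)
def wordsA : List String :=
  (PySem.List.pyRange 1 5 1).foldl
    (fun ws i =>
      (PySem.List.permutations ["aya", "ye", "woo", "ma"] i.toNat).foldl
        (fun ws j => ws ++ [PySem.Str.join "" j]) ws)
    []

def solution (babbling : List String) : Int :=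
  babbling.foldl (fun answer b => if wordsA.contains b then answer + 1 else answer) 0

-- ===== PORT B =====
-- greedy parser: port of Source B's _valid (s[i:] slicing is List.drop on s.toList)
def validB (cs : List Char) (au yu wu mu : Bool) : Bool :=
  if _h : cs = [] then au || yu || wu || mu
  else if !au && PySem.Chars.startswith cs ['a', 'y', 'a'] then validB (cs.drop 3) true yu wu mu
  else if !yu && PySem.Chars.startswith cs ['y', 'e'] then validB (cs.drop 2) au true wu mu
  else if !wu && PySem.Chars.startswith cs ['w', 'o', 'o'] then validB (cs.drop 3) au yu true mu
  else if !mu && PySem.Chars.startswith cs ['m', 'a'] then validB (cs.drop 2) au yu wu true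
  else false
termination_by cs.length
decreasing_by
  all_goals
    have : cs.length ≠ 0 := fun h => _h (List.eq_nil_of_length_eq_zero h)
    simp [List.length_drop]; omega

def solution_alt (babbling : List String) : Int :=
  babbling.foldl (fun answer b => if validB b.toList false false false false then answer + 1 else answer) 0

-- ===== PRECONDITION & SPEC =====
def Spec_solution (babbling : List String) (out : Int) : Prop := out = solution_alt babbling
instance (babbling : List String) (out : Int) : Decidable (Spec_solution babbling out) := by unfold Spec_solution; infer_instance

-- ===== CLAIM (what is proved, stated in full; the proofs are below) =====
def Claim_equal_solution : Prop := ∀ (babbling : List String), Dom_solution babbling → Spec_solution babbling (solution babbling)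

-- ===== LEMMAS AND PROOFS =====

-- spec: all strings the parser accepts from a given flag state (fuel = number of unused tokens)
def cands : Nat → Bool → Bool → Bool → Bool → List (List Char)
  | 0, au, yu, wu, mu => if au || yu || wu || mu then [[]] else []
  | n + 1, au, yu, wu, mu =>
    (if au || yu || wu || mu then [[]] else []) ++
    (if au then [] else (cands n true yu wu mu).map (['a', 'y', 'a'] ++ ·)) ++
    (if yu then [] else (cands n au true wu mu).map (['y', 'e'] ++ ·)) ++
    (if wu then [] else (cands n au yu true mu).map (['w', 'o', 'o'] ++ ·)) ++
    (if mu then [] else (cands n au yu wu true).map (['m', 'a'] ++ ·))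

def falses (au yu wu mu : Bool) : Nat :=
  (cond au 0 1) + (cond yu 0 1) + (cond wu 0 1) + (cond mu 0 1)

theorem falses_a (yu wu mu : Bool) : falses false yu wu mu = falses true yu wu mu + 1 := by
  cases yu <;> cases wu <;> cases mu <;> rfl
theorem falses_y (au wu mu : Bool) : falses au false wu mu = falses au true wu mu + 1 := by
  cases au <;> cases wu <;> cases mu <;> rfl
theorem falses_w (au yu mu : Bool) : falses au yu false mu = falses au yu true mu + 1 := by
  cases au <;> cases yu <;> cases mu <;> rfl
theorem falses_m (au yu wu : Bool) : falses au yu wu false = falses au yu wu true + 1 := by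
  cases au <;> cases yu <;> cases wu <;> rfl

theorem nil_mem_cands (n : Nat) (au yu wu mu : Bool) :
    [] ∈ cands n au yu wu mu ↔ (au || yu || wu || mu) = true := by
  cases n <;> simp [cands]

theorem validB_iff (cs : List Char) (au yu wu mu : Bool) :
    validB cs au yu wu mu = true ↔ cs ∈ cands (falses au yu wu mu) au yu wu mu := by
  fun_induction validB cs au yu wu mu with
  | case1 =>
    rename_i au yu wu mu
    simp [nil_mem_cands]
  | case2 =>
    rename_i cs au yu wu mu h0 h1 ih
    obtain ⟨hau, hpre⟩ := Bool.and_eq_true .. |>.mp h1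
    have hau : au = false := by simpa using hau
    obtain ⟨r, rfl⟩ := (PySem.Chars.startswith_iff ..).mp hpre
    subst hau
    rw [falses_a]
    rw [ih]
    simp [cands, List.mem_ite_nil_left]
  | case3 =>
    rename_i cs au yu wu mu h0 h1 h2 ih
    obtain ⟨hyu, hpre⟩ := Bool.and_eq_true .. |>.mp h2
    have hyu : yu = false := by simpa using hyu
    obtain ⟨r, rfl⟩ := (PySem.Chars.startswith_iff ..).mp hpre
    subst hyu
    rw [falses_y, ih]
    simp [cands, List.mem_ite_nil_left]
  | case4 =>
    rename_i cs au yu wu mu h0 h1 h2 h3 ih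
    obtain ⟨hwu, hpre⟩ := Bool.and_eq_true .. |>.mp h3
    have hwu : wu = false := by simpa using hwu
    obtain ⟨r, rfl⟩ := (PySem.Chars.startswith_iff ..).mp hpre
    subst hwu
    rw [falses_w, ih]
    simp [cands, List.mem_ite_nil_left]
  | case5 =>
    rename_i cs au yu wu mu h0 h1 h2 h3 h4 ih
    obtain ⟨hmu, hpre⟩ := Bool.and_eq_true .. |>.mp h4
    have hmu : mu = false := by simpa using hmu
    obtain ⟨r, rfl⟩ := (PySem.Chars.startswith_iff ..).mp hpre
    subst hmu
    rw [falses_m, ih]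
    simp [cands, List.mem_ite_nil_left]
  | case6 =>
    rename_i cs au yu wu mu h0 h1 h2 h3 h4
    simp only [Bool.false_eq_true, false_iff]
    intro hm
    have notpre : ∀ (t : List Char) (f : Bool) (r : List Char),
        ¬ (!f && PySem.Chars.startswith cs t) = true → f = false → cs = t ++ r → False := by
      intro t f r hff hf hcs
      rw [hf] at hff
      simp at hff
      exact absurd ((PySem.Chars.startswith_iff ..).mpr ⟨r, hcs.symm⟩) (by simp [hff])
    cases hn : falses au yu wu mu <;> rw [hn] at hm <;>
      simp [cands, List.mem_ite_nil_left] at hm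
    · exact h0 hm.2
    · rcases hm with hnil | ⟨hf, r, _, hcs⟩ | ⟨hf, r, _, hcs⟩ | ⟨hf, r, _, hcs⟩ | ⟨hf, r, _, hcs⟩
      · exact h0 hnil.2
      · exact notpre _ au r h1 (by simpa using hf) hcs.symm
      · exact notpre _ yu r h2 (by simpa using hf) hcs.symm
      · exact notpre _ wu r h3 (by simpa using hf) hcs.symm
      · exact notpre _ mu r h4 (by simpa using hf) hcs.symm

-- A's word list, evaluated
theorem wordsA_eval : wordsA = ["aya", "ye", "woo", "ma", "ayaye", "ayawoo", "ayama", "yeaya", "yewoo", "yema", "wooaya", "wooye", "wooma", "maaya", "maye", "mawoo", "ayayewoo", "ayayema", "ayawooye", "ayawooma", "ayamaye", "ayamawoo", "yeayawoo", "yeayama", "yewooaya", "yewooma", "yemaaya", "yemawoo", "wooayaye", "wooayama", "wooyeaya", "wooyema", "woomaaya", "woomaye", "maayaye", "maayawoo", "mayeaya", "mayewoo", "mawooaya", "mawooye", "ayayewooma", "ayayemawoo", "ayawooyema", "ayawoomaye", "ayamayewoo", "ayamawooye", "yeayawooma", "yeayamawoo", "yewooayama", "yewoomaaya", "yemaayawoo",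 "yemawooaya", "wooayayema", "wooayamaye", "wooyeayama", "wooyemaaya", "woomaayaye", "woomayeaya", "maayayewoo", "maayawooye", "mayeayawoo", "mayewooaya", "mawooayaye", "mawooyeaya"] := by
  decide

theorem mem_wordsA_iff (b : String) :
    wordsA.contains b = true ↔ b.toList ∈ cands 4 false false false false := by
  rw [List.contains_iff_mem, wordsA_eval]
  have h1 : ∀ x ∈ (["aya", "ye", "woo", "ma", "ayaye", "ayawoo", "ayama", "yeaya", "yewoo", "yema", "wooaya", "wooye", "wooma", "maaya", "maye", "mawoo", "ayayewoo", "ayayema", "ayawooye", "ayawooma", "ayamaye", "ayamawoo", "yeayawoo", "yeayama", "yewooaya", "yewooma", "yemaaya", "yemawoo", "wooayaye", "wooayama", "wooyeaya", "wooyema", "woomaaya", "woomaye", "maayaye", "maayawoo", "mayeaya", "mayewoo", "mawooaya", "mawooye", "ayayewooma", "ayayemawoo", "ayawooyema", "ayawoomaye", "ayamayewoo", "ayamawooye", "yeayawooma", "yeayamawoo", "yewooayama", "yewoomaaya", "yemaayawoo", "yemawooaya", "wooayayema", "wooayamaye", "wooyeayama", "wooyemaaya", "woomaayaye", "woomayeaya",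 "maayayewoo", "maayawooye", "mayeayawoo", "mayewooaya", "mawooayaye", "mawooyeaya"] : List String).map String.toList,
      x ∈ cands 4 false false false false := by decide
  have h2 : ∀ x ∈ cands 4 false false false false,
      x ∈ (["aya", "ye", "woo", "ma", "ayaye", "ayawoo", "ayama", "yeaya", "yewoo", "yema", "wooaya", "wooye", "wooma", "maaya", "maye", "mawoo", "ayayewoo", "ayayema", "ayawooye", "ayawooma", "ayamaye", "ayamawoo", "yeayawoo", "yeayama", "yewooaya", "yewooma", "yemaaya", "yemawoo", "wooayaye", "wooayama", "wooyeaya", "wooyema", "woomaaya", "woomaye", "maayaye", "maayawoo", "mayeaya", "mayewoo", "mawooaya", "mawooye", "ayayewooma", "ayayemawoo", "ayawooyema", "ayawoomaye", "ayamayewoo", "ayamawooye", "yeayawooma", "yeayamawoo", "yewooayama", "yewoomaaya", "yemaayawoo", "yemawooaya", "wooayayema", "wooayamaye", "wooyeayama", "wooyemaaya", "woomaayaye", "woomayeaya", "maayayewoo", "maayawooye", "mayeayawoo", "mayewooaya", "mawooayaye", "mawooyeaya"] : List String).map String.toList := by decide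
  constructor
  · intro hb
    exact h1 _ (List.mem_map_of_mem hb)
  · intro hb
    obtain ⟨w, hw, hwb⟩ := List.mem_map.mp (h2 _ hb)
    exact (String.toList_inj.mp hwb) ▸ hw
  
theorem per_string (b : String) :
    wordsA.contains b = validB b.toList false false false false := by
  have h1 := mem_wordsA_iff b
  have h2 := validB_iff b.toList false false false false
  have : falses false false false false = 4 := rfl
  rw [this] at h2
  cases hv : validB b.toList false false false false
  · cases hc : wordsA.contains b
    · rfl
    · exact absurd (h2.mpr (h1.mp hc)) (by simp [hv])
  · exact h1.mpr (h2.mp hv)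



-- ===== VERDICT (by name: the statement is the Claim_ definition above) =====
theorem solution_spec : Claim_equal_solution := by
  intro babbling _
  unfold Spec_solution solution solution_alt
  simp only [per_string]
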